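-- pv_equiv track=rewrite | github.com/hanproj/hanproject | soas_rnetwork_test.py | get_rhyme_type_if_it_is_there
-- ===== SOURCE A (Python) =====
-- def get_rhyme_type_if_it_is_there(line):
--     funct_name = 'get_rhyme_type_if_it_is_there()'
--     retval = ''
--     if '?' in line:
--         return retval
--     type_list = ['a', 'b', 'c', 'd', 'e', 'f', 'g', 'h', 'i']
--     for t in type_list:
--         if t in line:
--             return t
--     return retval
-- ===== SOURCE B (Python) =====
-- def get_rhyme_type_if_it_is_there(line):
--     if '?' in line:
--         return ''
--     present = set(line) & set('abcdefghi')
--     return min(present) if present else ''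
-- ===== Notes on version B (the rewrite author's own statement) =====
-- stated objective: simpler
-- what changed: Replaces the nine-iteration first-match membership loop by intersecting the set of the line's characters with the set of the nine rhyme-type letters and taking the minimum of that intersection (valid because the type list is ascending, so the first present letter is the smallest present letter).
import Mathlib
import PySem

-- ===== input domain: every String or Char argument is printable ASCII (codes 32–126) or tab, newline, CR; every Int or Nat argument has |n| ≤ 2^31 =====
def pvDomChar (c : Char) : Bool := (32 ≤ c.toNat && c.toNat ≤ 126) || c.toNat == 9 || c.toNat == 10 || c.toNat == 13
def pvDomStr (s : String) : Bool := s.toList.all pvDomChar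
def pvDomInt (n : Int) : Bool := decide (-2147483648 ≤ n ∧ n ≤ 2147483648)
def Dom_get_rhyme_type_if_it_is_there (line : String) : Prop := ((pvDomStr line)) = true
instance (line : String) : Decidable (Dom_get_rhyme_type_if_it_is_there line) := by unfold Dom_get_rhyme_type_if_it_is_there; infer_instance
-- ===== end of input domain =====

-- ===== PORT A =====
-- B replaces A's nine-iteration membership loop by a set intersection plus minimum; return values are equal, no side effects.
-- A's for-loop over the type list with early return:
def pvALoop (ts : List Char) (line : String) : String :=
  match ts with
  | [] => ""
  | t :: rest => if PySem.Str.isIn (String.ofList [t]) line then String.ofList [t] else pvALoop rest line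

def get_rhyme_type_if_it_is_there (line : String) : String :=
  if PySem.Str.isIn "?" line then ""
  else pvALoop ['a','b','c','d','e','f','g','h','i'] line

-- ===== PORT B =====
def get_rhyme_type_if_it_is_there_alt (line : String) : String :=
  if PySem.Str.isIn "?" line then ""
  else
    let present : PySem.Set Char :=
      PySem.Set.inter (PySem.Set.ofList line.toList) ("abcdefghi".toList)
    match PySem.List.min? present (fun c => c) with
    | some c => String.ofList [c]
    | none => ""

-- ===== PRECONDITION & SPEC =====
def Spec_get_rhyme_type_if_it_is_there (line : String) (out : String) : Prop := out = get_rhyme_type_if_it_is_there_alt line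
instance (line : String) (out : String) : Decidable (Spec_get_rhyme_type_if_it_is_there line out) := by unfold Spec_get_rhyme_type_if_it_is_there; infer_instance

-- ===== CLAIM (what is proved, stated in full; the proofs are below) =====
def Claim_equal_get_rhyme_type_if_it_is_there : Prop := ∀ (line : String), Dom_get_rhyme_type_if_it_is_there line → Spec_get_rhyme_type_if_it_is_there line (get_rhyme_type_if_it_is_there line)

-- ===== LEMMAS AND PROOFS =====
-- single-character membership: `t in line` for one char t
theorem pv_isIn_singleton (t : Char) (s : List Char) :
    PySem.Chars.isIn [t] s = true ↔ t ∈ s := by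
  rw [PySem.Chars.isIn_iff_infix]
  exact List.singleton_infix_iff t s

-- min? picks the (unique) least element
theorem pv_min?_eq_of_isMin (xs : List Char) (x : Char) (hx : x ∈ xs)
    (hmin : ∀ y ∈ xs, x ≤ y) : PySem.List.min? xs (fun c => c) = some x := by
  cases h : PySem.List.min? xs (fun c => c) with
  | none =>
      rw [PySem.List.min?_eq_none_iff] at h
      subst h; simp at hx
  | some m =>
      have hm := PySem.List.min?_mem h
      have h1 := PySem.List.min?_isMin h x hx
      have h2 := hmin m hm
      simp [le_antisymm h2 h1]

-- first match in a strictly increasing list is the least match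
theorem pv_find?_le (ts : List Char) (p : Char → Bool) :
    ts.Pairwise (· < ·) → ∀ c, ts.find? p = some c → ∀ y ∈ ts, p y = true → c ≤ y := by
  induction ts with
  | nil => intro _ c h; simp at h
  | cons t rest ih =>
      intro hsort c hfind y hy hpy
      rcases List.pairwise_cons.mp hsort with ⟨hlt, hrest⟩
      by_cases hpt : p t = true
      · rw [List.find?_cons_of_pos hpt] at hfind
        injection hfind with hfind
        subst hfind
        rcases List.mem_cons.mp hy with hy | hy
        · subst hy; exact le_refl _
        · exact le_of_lt (hlt y hy)
      · rw [List.find?_cons_of_neg (by simp [hpt])] at hfind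
        rcases List.mem_cons.mp hy with hy | hy
        · exact absurd (hy ▸ hpy) hpt
        · exact ih hrest c hfind y hy hpy

-- A's loop written as find?
theorem pv_aLoop_eq_find (ts : List Char) (line : String) :
    pvALoop ts line =
      match ts.find? (fun t => decide (t ∈ line.toList)) with
      | some c => String.ofList [c]
      | none => "" := by
  induction ts with
  | nil => simp [pvALoop]
  | cons t rest ih =>
      by_cases h : t ∈ line.toList
      · have h1 : PySem.Chars.isIn [t] line.toList = true := (pv_isIn_singleton _ _).mpr h
        simp [pvALoop, List.find?, h, h1]
      · have h1 : PySem.Chars.isIn [t] line.toList = false := by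
          cases hb : PySem.Chars.isIn [t] line.toList
          · rfl
          · exact absurd ((pv_isIn_singleton _ _).mp hb) h
        simp [pvALoop, List.find?, h, h1, ih]

theorem pv_main (line : String) :
    pvALoop ['a','b','c','d','e','f','g','h','i'] line =
      match PySem.List.min?
          (PySem.Set.inter (PySem.Set.ofList line.toList) ("abcdefghi".toList))
          (fun c => c) with
      | some c => String.ofList [c]
      | none => "" := by
  rw [pv_aLoop_eq_find]
  set ts : List Char := ['a','b','c','d','e','f','g','h','i'] with hts
  have hmemT : ∀ y : Char, y ∈ ("abcdefghi".toList) ↔ y ∈ ts := by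
    intro y; rw [hts]; constructor <;> (intro h; simpa using h)
  have hmemP : ∀ y : Char,
      y ∈ PySem.Set.inter (PySem.Set.ofList line.toList) ("abcdefghi".toList) ↔
        (y ∈ line.toList ∧ y ∈ ts) := by
    intro y
    rw [PySem.Set.mem_inter, PySem.Set.mem_ofList, hmemT]
  cases hf : ts.find? (fun t => decide (t ∈ line.toList)) with
  | none =>
      have hnone : ∀ y ∈ ts, y ∉ line.toList := by
        intro y hy
        have := List.find?_eq_none.mp hf y hy
        simpa using this
      have hempty :
          PySem.Set.inter (PySem.Set.ofList line.toList) ("abcdefghi".toList) = [] := by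
        apply List.eq_nil_iff_forall_not_mem.mpr
        intro y hy
        rcases (hmemP y).mp hy with ⟨h1, h2⟩
        exact hnone y h2 h1
      rw [hempty]
      rfl
  | some c =>
      have hc : c ∈ ts ∧ c ∈ line.toList := by
        refine ⟨List.mem_of_find?_eq_some hf, ?_⟩
        have := List.find?_some hf
        simpa using this
      have hsort : ts.Pairwise (· < ·) := by rw [hts]; decide
      have hmin : ∀ y ∈ PySem.Set.inter (PySem.Set.ofList line.toList)
          ("abcdefghi".toList), c ≤ y := by
        intro y hy
        rcases (hmemP y).mp hy with ⟨h1, h2⟩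
        exact pv_find?_le ts _ hsort c hf y h2 (by simpa using h1)
      have hcP : c ∈ PySem.Set.inter (PySem.Set.ofList line.toList)
          ("abcdefghi".toList) := (hmemP c).mpr ⟨hc.2, hc.1⟩
      rw [pv_min?_eq_of_isMin _ c hcP hmin]

-- ===== VERDICT (by name: the statement is the Claim_ definition above) =====
theorem get_rhyme_type_if_it_is_there_spec : Claim_equal_get_rhyme_type_if_it_is_there := by
  intro line _
  unfold Spec_get_rhyme_type_if_it_is_there get_rhyme_type_if_it_is_there get_rhyme_type_if_it_is_there_alt
  cases hq : PySem.Str.isIn "?" line with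
  | true => rfl
  | false =>
      simp only [Bool.false_eq_true, if_false]
      exact pv_main line
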